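-- pv_equiv track=rewrite | github.com/bica-tools/reticulate | reticulate/tutte.py | _laplacian_matrix
-- ===== SOURCE A (Python) =====
-- def _laplacian_matrix(nodes: list[int], edges: list[tuple[int, int]]) -> list[list[int]]:
--     """Build the Laplacian matrix L = D - A for the undirected graph."""
--     n = len(nodes)
--     idx = {v: i for i, v in enumerate(nodes)}
--     L = [[0] * n for _ in range(n)]
--
--     for u, v in edges:
--         iu, iv = idx[u], idx[v]
--         L[iu][iv] -= 1
--         L[iv][iu] -= 1
--         L[iu][iu] += 1
--         L[iv][iv] += 1
--
--     return L
-- ===== SOURCE B (Python) =====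
-- def _laplacian_matrix(nodes: list[int], edges: list[tuple[int, int]]) -> list[list[int]]:
--     """Build L = D - A literally: adjacency count matrix first, then degrees as row sums."""
--     n = len(nodes)
--     idx = {v: i for i, v in enumerate(nodes)}
--     adj = [[0] * n for _ in range(n)]
--     for u, v in edges:
--         iu, iv = idx[u], idx[v]
--         adj[iu][iv] += 1
--         adj[iv][iu] += 1
--     degree = [sum(row) for row in adj]
--     return [[degree[i] - adj[i][j] if i == j else -adj[i][j] for j in range(n)]
--             for i in range(n)]
-- ===== Notes on version B (the rewrite author's own statement) =====
-- stated objective: alternative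
-- what changed: Instead of A's single in-place edge pass that patches four Laplacian cells per edge, B first builds the adjacency count matrix, computes each degree as a row sum, and then forms L[i][j] = (degree[i] if i==j else 0) - adj[i][j] by a double loop, the literal D - A definition.
import Mathlib
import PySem

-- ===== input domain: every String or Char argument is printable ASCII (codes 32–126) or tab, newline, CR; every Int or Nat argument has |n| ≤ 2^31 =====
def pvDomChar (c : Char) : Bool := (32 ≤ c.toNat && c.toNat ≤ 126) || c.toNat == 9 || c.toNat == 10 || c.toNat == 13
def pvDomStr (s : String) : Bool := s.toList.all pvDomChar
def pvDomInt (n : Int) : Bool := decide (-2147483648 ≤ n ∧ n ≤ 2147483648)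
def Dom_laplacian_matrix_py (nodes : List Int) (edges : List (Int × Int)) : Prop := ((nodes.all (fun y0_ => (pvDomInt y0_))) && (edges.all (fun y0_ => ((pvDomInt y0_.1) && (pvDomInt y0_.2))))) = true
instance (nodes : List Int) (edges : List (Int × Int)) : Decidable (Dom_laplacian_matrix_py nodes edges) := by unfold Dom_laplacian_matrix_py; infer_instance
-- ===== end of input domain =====

-- B builds the adjacency count matrix first, takes degrees as row sums, then forms
-- L = D - A by a double loop; A patches four cells of L in place per edge in one pass.

-- ===== PORT A =====
-- idx = {v: i for i, v in enumerate(nodes)}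
def pvIdxA (nodes : List Int) : PySem.Dict Int Int :=
  (PySem.List.enumerate nodes 0).foldl (fun d p => d.insert p.2 p.1) PySem.Dict.empty

-- in-place L[i][j] = f(L[i][j]); every use is in range, where it is exactly the Python update
def pvAddA (M : List (List Int)) (i j : Nat) (f : Int → Int) : List (List Int) :=
  M.modify i (fun row => row.modify j f)

def laplacian_matrix_py (nodes : List Int) (edges : List (Int × Int)) : List (List Int) :=
  let n := nodes.length
  let idx := pvIdxA nodes
  let L := List.replicate n (List.replicate n (0 : Int))
  edges.foldl (fun L e =>
    match idx.get? e.1, idx.get? e.2 with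
    | some iu, some iv =>
        -- enumerate indices are ≥ 0, so .toNat is exact
        pvAddA (pvAddA (pvAddA (pvAddA L iu.toNat iv.toNat (fun x => x - 1))
          iv.toNat iu.toNat (fun x => x - 1)) iu.toNat iu.toNat (fun x => x + 1))
          iv.toNat iv.toNat (fun x => x + 1)
    | _, _ => L) L   -- Python raises KeyError here: excluded by Pre_

-- ===== PORT B =====
-- idx = {v: i for i, v in enumerate(nodes)}
def pvIdxB (nodes : List Int) : PySem.Dict Int Nat :=
  (nodes.zipIdx).foldl (fun d p => d.insert p.1 p.2) PySem.Dict.empty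

-- adj[i][j] += d  (all uses are in range, where it is exactly the Python in-place update)
def pvAddB (M : List (List Int)) (i j : Nat) (d : Int) : List (List Int) :=
  M.modify i (fun row => row.modify j (fun x => x + d))

def laplacian_matrix_py_alt (nodes : List Int) (edges : List (Int × Int)) : List (List Int) :=
  let n := nodes.length
  let idx := pvIdxB nodes
  let adj := edges.foldl (fun A e =>
    match idx.get? e.1 with
    | none => A   -- Python raises KeyError here: excluded by Pre_
    | some iu =>
      match idx.get? e.2 with
      | none => A   -- Python raises KeyError here: excluded by Pre_
      | some iv => pvAddB (pvAddB A iu iv 1) iv iu 1) (List.replicate n (List.replicate n (0 : Int)))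
  let degree := adj.map (fun row => row.foldl (· + ·) 0)
  (List.range n).map (fun i => (List.range n).map (fun j =>
    if i = j then degree.getD i 0 - (adj.getD i []).getD j 0
    else -(adj.getD i []).getD j 0))

-- ===== PRECONDITION & SPEC =====
-- Pre_ excludes exactly the inputs where Python A raises KeyError: an edge endpoint not in nodes.
def Pre_laplacian_matrix_py (nodes : List Int) (edges : List (Int × Int)) : Prop :=
  ∀ e ∈ edges, e.1 ∈ nodes ∧ e.2 ∈ nodes
instance (nodes : List Int) (edges : List (Int × Int)) : Decidable (Pre_laplacian_matrix_py nodes edges) := by unfold Pre_laplacian_matrix_py; infer_instance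

def pvWitness_laplacian_matrix_py : List Int × (List (Int × Int)) := ([10, 20, 30], [(10, 20), (20, 30), (10, 10)])

def Spec_laplacian_matrix_py (nodes : List Int) (edges : List (Int × Int)) (out : List (List Int)) : Prop := out = laplacian_matrix_py_alt nodes edges
instance (nodes : List Int) (edges : List (Int × Int)) (out : List (List Int)) : Decidable (Spec_laplacian_matrix_py nodes edges out) := by unfold Spec_laplacian_matrix_py; infer_instance

-- ===== CLAIM (what is proved, stated in full; the proofs are below) =====
def Claim_equal_laplacian_matrix_py : Prop := ∀ (nodes : List Int) (edges : List (Int × Int)), Dom_laplacian_matrix_py nodes edges → Pre_laplacian_matrix_py nodes edges → Spec_laplacian_matrix_py nodes edges (laplacian_matrix_py nodes edges)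

-- ===== LEMMAS AND PROOFS =====

-- matrix cell read with defaults (0 outside)
def pvGet (M : List (List Int)) (i j : Nat) : Int := (M.getD i []).getD j 0

-- A's f-style cell update is B's add-style update for the two functions A uses
lemma pvAddA_sub (M : List (List Int)) (i j : Nat) :
    pvAddA M i j (fun x => x - 1) = pvAddB M i j (-1) := by
  unfold pvAddA pvAddB
  have : (fun x : Int => x - 1) = (fun x : Int => x + (-1)) := funext fun x => by ring
  rw [this]

lemma pvAddA_add (M : List (List Int)) (i j : Nat) :
    pvAddA M i j (fun x => x + 1) = pvAddB M i j 1 := rfl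

-- A's idx dict (Int values, via enumerate) agrees with B's (Nat values, via zipIdx)
lemma pvIdx_bridge_aux (l : List (Int × Nat)) (dA : PySem.Dict Int Int) (dB : PySem.Dict Int Nat)
    (h : ∀ v, dA.get? v = (dB.get? v).map (fun k => (k : Int))) :
    ∀ v, (l.foldl (fun d p => d.insert p.1 ((p.2 : Nat) : Int)) dA).get? v
      = ((l.foldl (fun d p => d.insert p.1 p.2) dB).get? v).map (fun k => (k : Int)) := by
  induction l generalizing dA dB with
  | nil => exact h
  | cons p t ih =>
    refine ih _ _ (fun v => ?_)
    by_cases hv : v = p.1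
    · subst hv
      rw [PySem.Dict.get?_insert_self, PySem.Dict.get?_insert_self]
      rfl
    · rw [PySem.Dict.get?_insert_of_ne _ _ hv, PySem.Dict.get?_insert_of_ne _ _ hv]
      exact h v

lemma pvIdx_bridge (nodes : List Int) (v : Int) :
    (pvIdxA nodes).get? v = ((pvIdxB nodes).get? v).map (fun k => (k : Int)) := by
  unfold pvIdxA pvIdxB
  rw [PySem.List.enumerate_eq_zipIdx_map, List.foldl_map]
  dsimp only
  simp only [zero_add]
  exact pvIdx_bridge_aux nodes.zipIdx PySem.Dict.empty PySem.Dict.empty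
    (fun v => by simp [PySem.Dict.empty, PySem.Dict.get?]) v

-- hence A's per-edge step is B-shaped
lemma pvStepA_eq (nodes : List Int) (L : List (List Int)) (e : Int × Int) :
    (match (pvIdxA nodes).get? e.1, (pvIdxA nodes).get? e.2 with
      | some iu, some iv =>
          pvAddA (pvAddA (pvAddA (pvAddA L iu.toNat iv.toNat (fun x => x - 1))
            iv.toNat iu.toNat (fun x => x - 1)) iu.toNat iu.toNat (fun x => x + 1))
            iv.toNat iv.toNat (fun x => x + 1)
      | _, _ => L)
    = (match (pvIdxB nodes).get? e.1 with
      | none => L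
      | some iu =>
        match (pvIdxB nodes).get? e.2 with
        | none => L
        | some iv => pvAddB (pvAddB (pvAddB (pvAddB L iu iv (-1)) iv iu (-1)) iu iu 1) iv iv 1) := by
  rw [pvIdx_bridge nodes e.1, pvIdx_bridge nodes e.2]
  rcases (pvIdxB nodes).get? e.1 with _ | iu <;> rcases (pvIdxB nodes).get? e.2 with _ | iv <;>
    simp [pvAddA_sub, pvAddA_add]

-- square shape predicate
def pvSq (n : Nat) (M : List (List Int)) : Prop := M.length = n ∧ ∀ row ∈ M, row.length = n

lemma pvSq_replicate (n : Nat) : pvSq n (List.replicate n (List.replicate n (0 : Int))) := by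
  refine ⟨by simp, fun row hrow => ?_⟩
  have := List.eq_of_mem_replicate hrow
  simp [this]

lemma pvSq_pvAddB {n : Nat} {M : List (List Int)} (h : pvSq n M) {a : Nat} (ha : a < n)
    (b : Nat) (d : Int) : pvSq n (pvAddB M a b d) := by
  obtain ⟨h1, h2⟩ := h
  refine ⟨by simpa [pvAddB] using h1, fun row hrow => ?_⟩
  rw [pvAddB, List.modify_eq_set] at hrow
  rcases List.mem_or_eq_of_mem_set hrow with hmem | heq
  · exact h2 row hmem
  · have hlt : a < M.length := by omega
    have : M[a]?.getD default = M[a] := by simp [List.getElem?_eq_getElem hlt]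
    rw [heq, this, List.length_modify]
    exact h2 _ (List.getElem_mem hlt)

lemma pv_modify_cons_succ {α : Type} [Inhabited α] (x : α) (t : List α) (b : Nat) (f : α → α) :
    (x :: t).modify (b + 1) f = x :: t.modify b f := by
  rw [List.modify_eq_set, List.modify_eq_set]; simp

lemma pv_modify_cons_zero {α : Type} [Inhabited α] (x : α) (t : List α) (f : α → α) :
    (x :: t).modify 0 f = f x :: t := by
  rw [List.modify_eq_set]; simp

lemma pv_getD_modify {α : Type} [Inhabited α] (l : List α) (a : Nat) (f : α → α) (i : Nat) (d : α)
    (ha : a < l.length) :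
    (l.modify a f).getD i d = if i = a then f (l.getD a d) else l.getD i d := by
  induction l generalizing a i with
  | nil => simp at ha
  | cons x t ih =>
    cases a with
    | zero => cases i <;> simp
    | succ a' =>
      cases i with
      | zero => simp
      | succ i' =>
        rw [pv_modify_cons_succ, List.getD_cons_succ, List.getD_cons_succ,
            ih a' i' (by simpa using ha)]
        simp

lemma pv_sum_modify_add (row : List Int) (b : Nat) (d : Int) (hb : b < row.length) :
    (row.modify b (fun x => x + d)).sum = row.sum + d := by
  induction row generalizing b with
  | nil => simp at hb
  | cons x t ih =>
    cases b with
    | zero => rw [pv_modify_cons_zero, List.sum_cons, List.sum_cons]; ring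
    | succ b' =>
      rw [pv_modify_cons_succ, List.sum_cons, List.sum_cons, ih b' (by simpa using hb)]
      ring

-- row lengths of a square matrix, through getD
lemma pv_rowlen {n : Nat} {M : List (List Int)} (h : pvSq n M) {i : Nat} (hi : i < n) :
    (M.getD i []).length = n := by
  have hlt : i < M.length := by have := h.1; omega
  rw [List.getD_eq_getElem _ _ hlt]
  exact h.2 _ (List.getElem_mem hlt)

-- cell after pvAddB
lemma pvGet_pvAddB {n : Nat} {M : List (List Int)} (h : pvSq n M) {a b : Nat}
    (ha : a < n) (hb : b < n) (d : Int) (i j : Nat) :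
    pvGet (pvAddB M a b d) i j = pvGet M i j + (if i = a ∧ j = b then d else 0) := by
  have haM : a < M.length := by have := h.1; omega
  have hbrow : b < (M.getD a []).length := by rw [pv_rowlen h ha]; omega
  unfold pvGet pvAddB
  rw [pv_getD_modify M a _ i [] haM]
  by_cases hia : i = a
  · subst hia
    rw [if_pos rfl, pv_getD_modify _ b _ j 0 hbrow]
    by_cases hjb : j = b
    · simp [hjb]
    · simp [hjb]
  · rw [if_neg hia]
    simp [hia]

-- row sum after pvAddB
lemma pvRowSum_pvAddB {n : Nat} {M : List (List Int)} (h : pvSq n M) {a b : Nat}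
    (ha : a < n) (hb : b < n) (d : Int) (i : Nat) :
    ((pvAddB M a b d).getD i []).sum = (M.getD i []).sum + (if i = a then d else 0) := by
  have haM : a < M.length := by have := h.1; omega
  have hbrow : b < (M.getD a []).length := by rw [pv_rowlen h ha]; omega
  unfold pvAddB
  rw [pv_getD_modify M a _ i [] haM]
  by_cases hia : i = a
  · subst hia; rw [if_pos rfl, pv_sum_modify_add _ _ _ hbrow]; simp
  · rw [if_neg hia, if_neg hia]; ring

-- every index stored in the idx dict is < nodes.length
lemma pvIdxB_lt_aux (n : Nat) (l : List (Int × Nat)) (d : PySem.Dict Int Nat)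
    (hl : ∀ p ∈ l, p.2 < n) (hd : ∀ v k, d.get? v = some k → k < n) :
    ∀ v k, (l.foldl (fun d p => d.insert p.1 p.2) d).get? v = some k → k < n := by
  induction l generalizing d with
  | nil => exact hd
  | cons p t ih =>
    refine ih _ (fun q hq => hl q (List.mem_cons_of_mem _ hq)) (fun v k hvk => ?_)
    by_cases hv : v = p.1
    · subst hv
      rw [PySem.Dict.get?_insert_self] at hvk
      cases hvk
      exact hl p (List.mem_cons_self)
    · rw [PySem.Dict.get?_insert_of_ne _ _ hv] at hvk
      exact hd v k hvk

lemma pvIdxB_lt (nodes : List Int) (v : Int) (k : Nat) (h : (pvIdxB nodes).get? v = some k) :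
    k < nodes.length := by
  refine pvIdxB_lt_aux nodes.length nodes.zipIdx PySem.Dict.empty
    (fun p hp => List.snd_lt_of_mem_zipIdx hp)
    (fun v k h => by simp [PySem.Dict.empty, PySem.Dict.get?] at h) v k h

-- the per-edge arithmetic of the invariant, cells abstracted
lemma pv_if_arith (S C : Int) (i j iu iv : Nat) :
    ((if i = j then S else 0) - C) + (if i = iu ∧ j = iv then (-1 : Int) else 0)
      + (if i = iv ∧ j = iu then -1 else 0) + (if i = iu ∧ j = iu then 1 else 0)
      + (if i = iv ∧ j = iv then 1 else 0)
    = (if i = j then (S + (if i = iu then (1 : Int) else 0) + (if i = iv then 1 else 0)) else 0)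
      - (C + (if i = iu ∧ j = iv then 1 else 0) + (if i = iv ∧ j = iu then 1 else 0)) := by
  split_ifs <;> omega

-- the fold invariant: A's matrix cell = (diag row sum) - adjacency cell, maintained by every edge
lemma pv_invariant (idx : PySem.Dict Int Nat) (n : Nat)
    (hidx : ∀ v k, idx.get? v = some k → k < n)
    (edges : List (Int × Int)) (LA Adj : List (List Int))
    (hLA : pvSq n LA) (hAdj : pvSq n Adj)
    (hrel : ∀ i j, pvGet LA i j = (if i = j then (Adj.getD i []).sum else 0) - pvGet Adj i j) :
    pvSq n (edges.foldl (fun L e =>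
      match idx.get? e.1 with
      | none => L
      | some iu =>
        match idx.get? e.2 with
        | none => L
        | some iv => pvAddB (pvAddB (pvAddB (pvAddB L iu iv (-1)) iv iu (-1)) iu iu 1) iv iv 1) LA)
    ∧ pvSq n (edges.foldl (fun A e =>
      match idx.get? e.1 with
      | none => A
      | some iu =>
        match idx.get? e.2 with
        | none => A
        | some iv => pvAddB (pvAddB A iu iv 1) iv iu 1) Adj)
    ∧ ∀ i j, pvGet (edges.foldl (fun L e =>
      match idx.get? e.1 with
      | none => L
      | some iu =>
        match idx.get? e.2 with
        | none => L
        | some iv => pvAddB (pvAddB (pvAddB (pvAddB L iu iv (-1)) iv iu (-1)) iu iu 1) iv iv 1) LA) i j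
      = (if i = j then ((edges.foldl (fun A e =>
          match idx.get? e.1 with
          | none => A
          | some iu =>
            match idx.get? e.2 with
            | none => A
            | some iv => pvAddB (pvAddB A iu iv 1) iv iu 1) Adj).getD i []).sum else 0)
        - pvGet (edges.foldl (fun A e =>
          match idx.get? e.1 with
          | none => A
          | some iu =>
            match idx.get? e.2 with
            | none => A
            | some iv => pvAddB (pvAddB A iu iv 1) iv iu 1) Adj) i j := by
  induction edges generalizing LA Adj with
  | nil => exact ⟨hLA, hAdj, hrel⟩
  | cons e es ih =>
    simp only [List.foldl_cons]
    rcases h1 : idx.get? e.1 with _ | iu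
    · exact ih LA Adj hLA hAdj hrel
    rcases h2 : idx.get? e.2 with _ | iv
    · exact ih LA Adj hLA hAdj hrel
    have hu : iu < n := hidx _ _ h1
    have hv : iv < n := hidx _ _ h2
    have sqL1 := pvSq_pvAddB hLA hu iv (-1)
    have sqL2 := pvSq_pvAddB sqL1 hv iu (-1)
    have sqL3 := pvSq_pvAddB sqL2 hu iu 1
    have sqL4 := pvSq_pvAddB sqL3 hv iv 1
    have sqA1 := pvSq_pvAddB hAdj hu iv 1
    have sqA2 := pvSq_pvAddB sqA1 hv iu 1
    refine ih _ _ sqL4 sqA2 (fun i j => ?_)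
    rw [pvGet_pvAddB sqL3 hv hv 1 i j, pvGet_pvAddB sqL2 hu hu 1 i j,
        pvGet_pvAddB sqL1 hv hu (-1) i j, pvGet_pvAddB hLA hu hv (-1) i j,
        pvGet_pvAddB sqA1 hv hu 1 i j, pvGet_pvAddB hAdj hu hv 1 i j,
        pvRowSum_pvAddB sqA1 hv hu 1 i, pvRowSum_pvAddB hAdj hu hv 1 i,
        hrel i j]
    exact pv_if_arith _ _ i j iu iv

-- base matrix facts
lemma pv_getD_replicate_row (n i : Nat) :
    (List.replicate n (List.replicate n (0 : Int))).getD i [] = if i < n then List.replicate n (0 : Int) else [] := by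
  by_cases hi : i < n
  · rw [if_pos hi, List.getD_eq_getElem _ _ (by simpa using hi), List.getElem_replicate]
  · rw [if_neg hi, List.getD_eq_default _ _ (by simpa using Nat.le_of_not_lt hi)]

lemma pvGet_zero (n i j : Nat) : pvGet (List.replicate n (List.replicate n (0 : Int))) i j = 0 := by
  unfold pvGet
  rw [pv_getD_replicate_row]
  by_cases hi : i < n
  · rw [if_pos hi]
    by_cases hj : j < n
    · rw [List.getD_eq_getElem _ _ (by simpa using hj), List.getElem_replicate]
    · rw [List.getD_eq_default _ _ (by simpa using Nat.le_of_not_lt hj)]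
  · rw [if_neg hi, List.getD_nil]

lemma pvRowSum_zero (n i : Nat) : ((List.replicate n (List.replicate n (0 : Int))).getD i []).sum = 0 := by
  rw [pv_getD_replicate_row]
  by_cases hi : i < n
  · rw [if_pos hi]; simp
  · rw [if_neg hi]; simp

-- ===== VERDICT (by name: the statement is the Claim_ definition above) =====
theorem laplacian_matrix_py_spec : Claim_equal_laplacian_matrix_py := by
  intro nodes edges _ _
  unfold Spec_laplacian_matrix_py laplacian_matrix_py laplacian_matrix_py_alt
  dsimp only
  have hfold : edges.foldl (fun (L : List (List Int)) (e : Int × Int) =>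
      match (pvIdxA nodes).get? e.1, (pvIdxA nodes).get? e.2 with
      | some iu, some iv =>
          pvAddA (pvAddA (pvAddA (pvAddA L iu.toNat iv.toNat (fun x => x - 1))
            iv.toNat iu.toNat (fun x => x - 1)) iu.toNat iu.toNat (fun x => x + 1))
            iv.toNat iv.toNat (fun x => x + 1)
      | _, _ => L) (List.replicate nodes.length (List.replicate nodes.length (0 : Int)))
    = edges.foldl (fun (L : List (List Int)) (e : Int × Int) =>
      match (pvIdxB nodes).get? e.1 with
      | none => L
      | some iu =>
        match (pvIdxB nodes).get? e.2 with
        | none => L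
        | some iv => pvAddB (pvAddB (pvAddB (pvAddB L iu iv (-1)) iv iu (-1)) iu iu 1) iv iv 1) (List.replicate nodes.length (List.replicate nodes.length (0 : Int))) :=
    PySem.List.foldl_congr_mem _ _ _ _ (fun acc x _ => pvStepA_eq nodes acc x)
  rw [hfold]
  obtain ⟨hSqL, hSqA, hrel⟩ := pv_invariant (pvIdxB nodes) nodes.length (pvIdxB_lt nodes) edges
    (List.replicate nodes.length (List.replicate nodes.length (0 : Int)))
    (List.replicate nodes.length (List.replicate nodes.length (0 : Int)))
    (pvSq_replicate _) (pvSq_replicate _)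
    (fun i j => by rw [pvGet_zero, pvRowSum_zero]; simp)
  set n := nodes.length with hn
  set LA := edges.foldl (fun L e =>
      match (pvIdxB nodes).get? e.1 with
      | none => L
      | some iu =>
        match (pvIdxB nodes).get? e.2 with
        | none => L
        | some iv => pvAddB (pvAddB (pvAddB (pvAddB L iu iv (-1)) iv iu (-1)) iu iu 1) iv iv 1) (List.replicate n (List.replicate n (0 : Int))) with hLAdef
  set Adj := edges.foldl (fun A e =>
      match (pvIdxB nodes).get? e.1 with
      | none => A
      | some iu =>
        match (pvIdxB nodes).get? e.2 with
        | none => A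
        | some iv => pvAddB (pvAddB A iu iv 1) iv iu 1) (List.replicate n (List.replicate n (0 : Int))) with hAdjdef
  have hdeg : ∀ i : Nat, i < n →
      ((Adj.map (fun row => row.foldl (· + ·) 0)).getD i 0) = (Adj.getD i []).sum := by
    intro i hi
    have hiA : i < Adj.length := by rw [hSqA.1]; exact hi
    rw [List.getD_eq_getElem _ _ (by simpa using hiA), List.getElem_map,
        List.getD_eq_getElem _ _ hiA]
    have h0 := PySem.List.foldl_add (Adj[i]'hiA) (fun x => x) 0
    simpa using h0
  apply List.ext_getElem
  · rw [hSqL.1]; simp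
  intro i hiL hiR
  have hi : i < n := by rw [← hSqL.1]; exact hiL
  rw [List.getElem_map, List.getElem_range]
  apply List.ext_getElem
  · rw [List.length_map, List.length_range]
    exact hSqL.2 _ (List.getElem_mem hiL)
  intro j hjL hjR
  have hj : j < n := by
    have := hSqL.2 _ (List.getElem_mem hiL); omega
  rw [List.getElem_map, List.getElem_range]
  have hLij : (LA[i]'hiL)[j]'hjL = pvGet LA i j := by
    unfold pvGet
    rw [List.getD_eq_getElem LA [] hiL, List.getD_eq_getElem _ 0 hjL]
  rw [hLij, hrel i j, hdeg i hi]
  by_cases hij : i = j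
  · rw [if_pos hij, if_pos hij]
    simp [pvGet]
  · rw [if_neg hij, if_neg hij]
    simp [pvGet]
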